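-- pv_equiv track=rewrite | github.com/xinchihuang/vit_formation_control | scripts/utils/initial_pose.py | is_graph_balanced
-- ===== SOURCE A (Python) =====
-- def is_graph_balanced(adjacency_matrix):
--     num_nodes = len(adjacency_matrix)
--
--     for node in range(num_nodes):
--         indegree = sum(adjacency_matrix[i][node] for i in range(num_nodes))
--         outdegree = sum(adjacency_matrix[node][i] for i in range(num_nodes))
--
--         if indegree != outdegree:
--             return False
--
--     return True
-- ===== SOURCE B (Python) =====
-- def is_graph_balanced(adjacency_matrix):
--     n = len(adjacency_matrix)
--     colsum = [0] * n
--     rowsum = []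
--     for row in adjacency_matrix:
--         s = 0
--         for j in range(n):
--             v = row[j]
--             colsum[j] += v
--             s += v
--         rowsum.append(s)
--     for k in range(n):
--         if colsum[k] != rowsum[k]:
--             return False
--     return True
-- ===== Notes on version B (the rewrite author's own statement) =====
-- stated objective: alternative
-- what changed: Replaces A's n per-node paired column/row reductions with a single combined accumulation pass that builds all row sums and column sums from one read of each entry, followed by a separate comparison pass.
-- outside the precondition, e.g. on is_graph_balanced([[0, 1], [0]]): A returns False, B raises IndexError
import Mathlib
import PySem

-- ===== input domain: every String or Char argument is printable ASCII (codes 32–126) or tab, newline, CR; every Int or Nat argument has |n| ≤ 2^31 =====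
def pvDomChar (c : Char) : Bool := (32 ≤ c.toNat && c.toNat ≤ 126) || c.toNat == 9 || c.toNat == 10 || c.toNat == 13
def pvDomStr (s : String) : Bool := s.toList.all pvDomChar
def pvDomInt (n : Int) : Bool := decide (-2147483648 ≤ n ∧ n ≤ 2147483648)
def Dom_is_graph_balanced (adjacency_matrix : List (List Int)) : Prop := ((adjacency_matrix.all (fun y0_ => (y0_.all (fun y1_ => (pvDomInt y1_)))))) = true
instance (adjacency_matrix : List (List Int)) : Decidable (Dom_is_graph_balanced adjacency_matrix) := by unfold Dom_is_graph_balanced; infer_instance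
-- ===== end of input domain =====

-- B's objective: one combined accumulation pass over the matrix building both row sums
-- and column sums, then a comparison pass — instead of A's per-node paired reductions.

-- ===== PORT A =====
-- adjacency_matrix[i][node] etc.; out-of-range (IndexError) is excluded by Pre_, so .getD is never the taken branch there
def aEntry (m : List (List Int)) (i node : Nat) : Int :=
  ((PySem.List.pyGet? ((PySem.List.pyGet? m (i : Int)).getD []) (node : Int))).getD 0

def aIndeg (m : List (List Int)) (node : Nat) : Int :=
  (List.range m.length).foldl (fun s i => s + aEntry m i node) 0

def aOutdeg (m : List (List Int)) (node : Nat) : Int :=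
  (List.range m.length).foldl (fun s i => s + aEntry m node i) 0

def aLoop (m : List (List Int)) : List Nat → Bool
  | [] => true
  | node :: rest =>
      if aIndeg m node ≠ aOutdeg m node then false else aLoop m rest

def is_graph_balanced (adjacency_matrix : List (List Int)) : Bool :=
  aLoop adjacency_matrix (List.range adjacency_matrix.length)

-- ===== PORT B =====
-- row[j]; out-of-range (IndexError) excluded by Pre_
def bEntry (row : List Int) (j : Nat) : Int :=
  (PySem.List.pyGet? row (j : Int)).getD 0

-- inner loop: for j in range(n): v = row[j]; colsum[j] += v; s += v
def bRow (n : Nat) (row : List Int) (cs : List Int) : List Int × Int :=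
  (List.range n).foldl
    (fun p j => (p.1.set j (p.1.getD j 0 + bEntry row j), p.2 + bEntry row j))
    (cs, 0)

-- outer loop over the rows, appending each row total to rowsum
def bOuter (n : Nat) : List (List Int) → List Int × List Int → List Int × List Int
  | [], st => st
  | row :: rest, (cs, rs) =>
      let p := bRow n row cs
      bOuter n rest (p.1, rs ++ [p.2])

-- final loop: for k in range(n): if colsum[k] != rowsum[k]: return False
def bCheck (cs rs : List Int) : List Nat → Bool
  | [] => true
  | k :: ks => if cs.getD k 0 ≠ rs.getD k 0 then false else bCheck cs rs ks

def is_graph_balanced_alt (adjacency_matrix : List (List Int)) : Bool :=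
  let n := adjacency_matrix.length
  let p := bOuter n adjacency_matrix (List.replicate n 0, [])
  bCheck p.1 p.2 (List.range n)

-- ===== PRECONDITION & SPEC =====
-- Pre_ excludes ragged matrices (a row shorter than the number of rows): there Python A either
-- raises IndexError or happens to return False before reaching the short row, while B's full
-- accumulation pass always raises IndexError on them.
def Pre_is_graph_balanced (adjacency_matrix : List (List Int)) : Prop :=
  ∀ row ∈ adjacency_matrix, adjacency_matrix.length ≤ row.length
instance (adjacency_matrix : List (List Int)) : Decidable (Pre_is_graph_balanced adjacency_matrix) := by
  unfold Pre_is_graph_balanced; infer_instance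

def pvWitness_is_graph_balanced : List (List Int) := [[0, 1], [1, 0]]

def Spec_is_graph_balanced (adjacency_matrix : List (List Int)) (out : Bool) : Prop := out = is_graph_balanced_alt adjacency_matrix
instance (adjacency_matrix : List (List Int)) (out : Bool) : Decidable (Spec_is_graph_balanced adjacency_matrix out) := by unfold Spec_is_graph_balanced; infer_instance

-- ===== CLAIM (what is proved, stated in full; the proofs are below) =====
def Claim_equal_is_graph_balanced : Prop := ∀ (adjacency_matrix : List (List Int)), Dom_is_graph_balanced adjacency_matrix → Pre_is_graph_balanced adjacency_matrix → Spec_is_graph_balanced adjacency_matrix (is_graph_balanced adjacency_matrix)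

-- ===== LEMMAS AND PROOFS =====

-- A's loop is `all` over the node list
theorem aLoop_eq_all (m : List (List Int)) (ks : List Nat) :
    aLoop m ks = ks.all (fun k => aIndeg m k == aOutdeg m k) := by
  induction ks with
  | nil => rfl
  | cons k ks ih =>
      show (if aIndeg m k ≠ aOutdeg m k then false else aLoop m ks) = _
      by_cases h : aIndeg m k = aOutdeg m k
      · rw [if_neg (fun hc => hc h), ih]; simp [List.all_cons, h]
      · rw [if_pos h]; simp [List.all_cons, h]

-- B's check loop is `all` over the index list
theorem bCheck_eq_all (cs rs : List Int) (ks : List Nat) :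
    bCheck cs rs ks = ks.all (fun k => cs.getD k 0 == rs.getD k 0) := by
  induction ks with
  | nil => rfl
  | cons k ks ih =>
      show (if cs.getD k 0 ≠ rs.getD k 0 then false else bCheck cs rs ks) = _
      by_cases h : cs.getD k 0 = rs.getD k 0
      · rw [if_neg (fun hc => hc h), ih, List.all_cons, h, beq_self_eq_true, Bool.true_and]
      · rw [if_pos h, List.all_cons, beq_eq_false_iff_ne.mpr h, Bool.false_and]

-- the pair fold splits into independent component folds
theorem bRow_snd (row : List Int) (l : List Nat) (cs : List Int) (s : Int) :
    (l.foldl (fun p j => (p.1.set j (p.1.getD j 0 + bEntry row j), p.2 + bEntry row j)) (cs, s)).2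
      = l.foldl (fun a j => a + bEntry row j) s := by
  induction l generalizing cs s with
  | nil => rfl
  | cons j l ih => rw [List.foldl_cons]; exact ih _ _

theorem bRow_fst (row : List Int) (l : List Nat) (cs : List Int) (s : Int) :
    (l.foldl (fun p j => (p.1.set j (p.1.getD j 0 + bEntry row j), p.2 + bEntry row j)) (cs, s)).1
      = l.foldl (fun c j => c.set j (c.getD j 0 + bEntry row j)) cs := by
  induction l generalizing cs s with
  | nil => rfl
  | cons j l ih => rw [List.foldl_cons]; exact ih _ _

theorem csFold_length (row : List Int) (n : Nat) (cs : List Int) :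
    ((List.range n).foldl (fun c j => c.set j (c.getD j 0 + bEntry row j)) cs).length = cs.length := by
  induction n generalizing cs with
  | zero => rfl
  | succ n ih =>
      rw [List.range_succ, List.foldl_append]
      simp only [List.foldl_cons, List.foldl_nil, List.length_set]
      exact ih cs

theorem getD_set_self (l : List Int) (i : Nat) (v : Int) (h : i < l.length) :
    (l.set i v).getD i 0 = v := by
  simp [List.getD, h]

theorem getD_set_ne (l : List Int) (i k : Nat) (v : Int) (h : i ≠ k) :
    (l.set i v).getD k 0 = l.getD k 0 := by
  simp [List.getD, List.getElem?_set_ne h]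

theorem csFold_getD (row : List Int) (n : Nat) (cs : List Int) (hn : n ≤ cs.length) (k : Nat) :
    ((List.range n).foldl (fun c j => c.set j (c.getD j 0 + bEntry row j)) cs).getD k 0
      = cs.getD k 0 + (if k < n then bEntry row k else 0) := by
  induction n generalizing k with
  | zero => simp
  | succ n ih =>
      rw [List.range_succ, List.foldl_append]
      simp only [List.foldl_cons, List.foldl_nil]
      by_cases hk : k = n
      · subst hk
        rw [getD_set_self _ _ _ (by rw [csFold_length]; omega),
            ih (by omega) k]
        simp
      · rw [getD_set_ne _ _ _ _ (fun h => hk h.symm), ih (by omega) k]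
        by_cases h : k < n
        · rw [if_pos h, if_pos (by omega)]
        · rw [if_neg h, if_neg (by omega)]

-- column sums after the whole outer loop (as a fold over the rows)
theorem bOuter_fst_getD (n : Nat) (rows : List (List Int)) (cs rs : List Int)
    (hn : n ≤ cs.length) (k : Nat) (hk : k < n) :
    (bOuter n rows (cs, rs)).1.getD k 0
      = rows.foldl (fun a row => a + bEntry row k) (cs.getD k 0) := by
  induction rows generalizing cs rs with
  | nil => rfl
  | cons row rest ih =>
      have h1 : (bRow n row cs).1
          = (List.range n).foldl (fun c j => c.set j (c.getD j 0 + bEntry row j)) cs := by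
        unfold bRow; exact bRow_fst _ _ _ _
      have hlen : n ≤ (bRow n row cs).1.length := by rw [h1, csFold_length]; omega
      simp only [bOuter, List.foldl_cons]
      rw [ih _ _ hlen, h1, csFold_getD _ _ _ hn k, if_pos hk]

-- row totals list after the whole outer loop
theorem bOuter_snd (n : Nat) (rows : List (List Int)) (cs rs : List Int) :
    (bOuter n rows (cs, rs)).2
      = rs ++ rows.map (fun row => (List.range n).foldl (fun a j => a + bEntry row j) 0) := by
  induction rows generalizing cs rs with
  | nil => simp [bOuter]
  | cons row rest ih =>
      have h2 : (bRow n row cs).2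
          = (List.range n).foldl (fun a j => a + bEntry row j) 0 := by
        unfold bRow; exact bRow_snd _ _ _ _
      simp only [bOuter]
      rw [ih, h2]
      simp

-- fold over indices of a list equals fold over the list
theorem foldl_range_length {α β : Type} (l : List α) (d : α) (f : β → α → β) (b : β) :
    (List.range l.length).foldl (fun s i => f s (l.getD i d)) b = l.foldl f b := by
  induction l generalizing b with
  | nil => rfl
  | cons a t ih =>
      rw [List.length_cons, List.range_succ_eq_map]
      simp only [List.foldl_cons, List.foldl_map]
      simpa using ih (f b a)

theorem aEntry_eq (m : List (List Int)) (i k : Nat) (hi : i < m.length) :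
    aEntry m i k = bEntry (m.getD i []) k := by
  unfold aEntry bEntry
  rw [PySem.List.pyGet?_natCast]
  simp [List.getD, List.getElem?_eq_getElem hi]

theorem aIndeg_eq (m : List (List Int)) (k : Nat) :
    aIndeg m k = m.foldl (fun a row => a + bEntry row k) 0 := by
  unfold aIndeg
  rw [← foldl_range_length m [] (fun a row => a + bEntry row k) 0]
  apply PySem.List.foldl_congr_mem
  intro acc i hi
  rw [aEntry_eq _ _ _ (by simpa using List.mem_range.mp hi)]

theorem aOutdeg_eq (m : List (List Int)) (k : Nat) (hk : k < m.length) :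
    aOutdeg m k = (List.range m.length).foldl (fun a j => a + bEntry (m.getD k []) j) 0 := by
  unfold aOutdeg
  apply PySem.List.foldl_congr_mem
  intro acc i _
  rw [aEntry_eq _ _ _ hk]

theorem getD_map (f : List Int → Int) (m : List (List Int)) (k : Nat) (hk : k < m.length) :
    (m.map f).getD k 0 = f (m.getD k []) := by
  simp [List.getD, hk]

theorem all_congr_mem {α : Type} (l : List α) (p q : α → Bool)
    (h : ∀ x ∈ l, p x = q x) : l.all p = l.all q := by
  induction l with
  | nil => rfl
  | cons a t ih =>
      simp only [List.all_cons, h a (by simp), ih (fun x hx => h x (by simp [hx]))]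

-- ===== VERDICT (by name: the statement is the Claim_ definition above) =====
theorem is_graph_balanced_spec : Claim_equal_is_graph_balanced := by
  intro m _ _
  unfold Spec_is_graph_balanced
  show is_graph_balanced m = is_graph_balanced_alt m
  unfold is_graph_balanced is_graph_balanced_alt
  rw [aLoop_eq_all, bCheck_eq_all]
  apply all_congr_mem
  intro k hk
  have hk' : k < m.length := List.mem_range.mp hk
  rw [bOuter_fst_getD _ _ _ _ (by simp) k hk', bOuter_snd,
      List.nil_append, getD_map _ _ _ (by simpa using hk'),
      aIndeg_eq, aOutdeg_eq _ _ hk']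
  simp
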